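-- pv_equiv track=rewrite | github.com/ronisillman/FilaBoss | python_lcd_ui/ui_controller.py | _blink_digit
-- ===== SOURCE A (Python) =====
-- def _blink_digit(text: str, active_digit: int, blink_on: bool) -> str:
--     if blink_on:
--         return text
--
--     digit_positions = [index for index, char in enumerate(text) if char.isdigit()]
--     if active_digit < 0 or active_digit >= len(digit_positions):
--         return text
--
--     target_index = digit_positions[active_digit]
--     return f"{text[:target_index]} {text[target_index + 1:]}"
-- ===== SOURCE B (Python) =====
-- def _blink_digit(text: str, active_digit: int, blink_on: bool) -> str:
--     if blink_on:
--         return text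
--     out = []
--     k = active_digit
--     for ch in text:
--         if ch.isdigit():
--             out.append(" " if k == 0 else ch)
--             k -= 1
--         else:
--             out.append(ch)
--     return "".join(out)
-- ===== Notes on version B (the rewrite author's own statement) =====
-- stated objective: alternative
-- what changed: B rebuilds the whole output character by character with a countdown k that starts at active_digit and decreases at every digit, emitting a space exactly when the countdown is zero at a digit; A instead collects a list of all digit positions, indexes it, and splices the string with slices.
import Mathlib
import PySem

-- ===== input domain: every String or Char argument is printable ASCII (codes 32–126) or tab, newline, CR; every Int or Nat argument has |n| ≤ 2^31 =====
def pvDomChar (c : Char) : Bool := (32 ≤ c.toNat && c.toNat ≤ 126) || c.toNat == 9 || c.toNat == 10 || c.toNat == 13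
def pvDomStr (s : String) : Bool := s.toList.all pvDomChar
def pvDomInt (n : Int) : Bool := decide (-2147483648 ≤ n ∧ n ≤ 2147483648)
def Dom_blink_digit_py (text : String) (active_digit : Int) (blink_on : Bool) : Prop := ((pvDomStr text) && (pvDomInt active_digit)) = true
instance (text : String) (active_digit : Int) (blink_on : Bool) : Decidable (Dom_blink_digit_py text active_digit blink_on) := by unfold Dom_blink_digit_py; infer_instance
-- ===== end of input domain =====

-- B rebuilds the output character by character with a countdown, instead of A's collect-all-digit-positions-then-slice; alternative decomposition, same values.

-- ===== PORT A =====
def blink_digit_py (text : String) (active_digit : Int) (blink_on : Bool) : String :=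
  if blink_on then text
  else
    let digit_positions : List Int :=
      ((PySem.List.enumerate text.toList 0).filter (fun p => PySem.Chars.isdigit p.2)).map (·.1)
    if active_digit < 0 ∨ active_digit ≥ digit_positions.length then text
    else
      let target_index := (PySem.List.pyGet? digit_positions active_digit).getD 0
      String.ofList (PySem.List.slice text.toList none (some target_index) ++
        ' ' :: PySem.List.slice text.toList (some (target_index + 1)) none)

-- ===== PORT B =====
-- the for-loop of Source B: emit each character, replacing a digit by ' ' exactly when the countdown k is 0 there
def rebuild (k : Int) : List Char → List Char
  | [] => []
  | c :: cs =>
    if PySem.Chars.isdigit c then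
      (if k = 0 then ' ' else c) :: rebuild (k - 1) cs
    else
      c :: rebuild k cs

def blink_digit_py_alt (text : String) (active_digit : Int) (blink_on : Bool) : String :=
  if blink_on then text
  else String.ofList (rebuild active_digit text.toList)

-- ===== PRECONDITION & SPEC =====
def Spec_blink_digit_py (text : String) (active_digit : Int) (blink_on : Bool) (out : String) : Prop := out = blink_digit_py_alt text active_digit blink_on
instance (text : String) (active_digit : Int) (blink_on : Bool) (out : String) : Decidable (Spec_blink_digit_py text active_digit blink_on out) := by unfold Spec_blink_digit_py; infer_instance

-- ===== CLAIM =====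
def Claim_equal_blink_digit_py : Prop := ∀ (text : String) (active_digit : Int) (blink_on : Bool), Dom_blink_digit_py text active_digit blink_on → Spec_blink_digit_py text active_digit blink_on (blink_digit_py text active_digit blink_on)

-- ===== LEMMAS AND PROOFS =====

-- digit positions (as Nats, in whole-text coordinates) of a suffix starting at index i
def digitIdxs : List Char → Nat → List Nat
  | [], _ => []
  | c :: cs, i =>
    if PySem.Chars.isdigit c then i :: digitIdxs cs (i + 1) else digitIdxs cs (i + 1)

theorem enum_filter_eq (l : List Char) (i : Nat) :
    ((PySem.List.enumerate l (i : Int)).filter (fun p => PySem.Chars.isdigit p.2)).map (·.1)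
      = (digitIdxs l i).map (fun (n : Nat) => (n : Int)) := by
  induction l generalizing i with
  | nil => simp [PySem.List.enumerate_nil, digitIdxs]
  | cons c cs ih =>
    rw [PySem.List.enumerate_cons]
    by_cases h : PySem.Chars.isdigit c
    · have := ih (i + 1)
      simp [digitIdxs, h, List.filter_cons] at this ⊢
      push_cast
      exact this
    · have := ih (i + 1)
      simp [digitIdxs, h, List.filter_cons] at this ⊢
      push_cast
      exact this

theorem digitIdxs_shift (l : List Char) (i : Nat) :
    digitIdxs l (i + 1) = (digitIdxs l i).map (· + 1) := by
  induction l generalizing i with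
  | nil => simp [digitIdxs]
  | cons c cs ih =>
    by_cases h : PySem.Chars.isdigit c <;> simp [digitIdxs, h, ih]

theorem rebuild_neg (k : Int) (hk : k < 0) (l : List Char) : rebuild k l = l := by
  induction l generalizing k with
  | nil => rfl
  | cons c cs ih =>
    by_cases h : PySem.Chars.isdigit c
    · have hne : k ≠ 0 := by omega
      simp [rebuild, h, hne, ih (k - 1) (by omega)]
    · simp [rebuild, h, ih k hk]

theorem rebuild_eq (l : List Char) (k : Int) (hk : 0 ≤ k) :
    rebuild k l =
      match (digitIdxs l 0)[k.toNat]? with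
      | some t => l.take t ++ ' ' :: l.drop (t + 1)
      | none => l := by
  induction l generalizing k with
  | nil => simp [rebuild, digitIdxs]
  | cons c cs ih =>
    by_cases h : PySem.Chars.isdigit c
    · by_cases hz : k = 0
      · subst hz
        simp [rebuild, h, digitIdxs, rebuild_neg (-1) (by omega) cs]
      · have hpos : 0 < k := lt_of_le_of_ne hk (by omega)
        have hstep : k.toNat = (k - 1).toNat + 1 := by omega
        have hsh : digitIdxs cs 1 = (digitIdxs cs 0).map (· + 1) := by
          have := digitIdxs_shift cs 0; simpa using this
        simp only [rebuild, h, if_true, hz, if_false, digitIdxs, hstep,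
          List.getElem?_cons_succ, hsh, List.getElem?_map]
        rw [ih (k - 1) (by omega)]
        cases hget : (digitIdxs cs 0)[(k - 1).toNat]? with
        | none => simp [hget]
        | some t => simp [hget, List.take_succ_cons, List.drop_succ_cons]
    · have hsh : digitIdxs cs 1 = (digitIdxs cs 0).map (· + 1) := by
        have := digitIdxs_shift cs 0; simpa using this
      simp only [rebuild, h, if_false, digitIdxs, hsh, List.getElem?_map]
      rw [ih k hk]
      cases hget : (digitIdxs cs 0)[k.toNat]? with
      | none => simp [hget]
      | some t => simp [hget, List.take_succ_cons, List.drop_succ_cons]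

-- ===== VERDICT =====
theorem blink_digit_py_spec : Claim_equal_blink_digit_py := by
  intro text ad blink_on _
  unfold Spec_blink_digit_py blink_digit_py blink_digit_py_alt
  by_cases hb : blink_on
  · simp [hb]
  · have hpos : ((PySem.List.enumerate text.toList 0).filter
        (fun p => PySem.Chars.isdigit p.2)).map (·.1)
        = (digitIdxs text.toList 0).map (fun (n : Nat) => (n : Int)) := by
      have h := enum_filter_eq text.toList 0
      rwa [Nat.cast_zero] at h
    simp only [hb, Bool.false_eq_true, if_false, hpos, List.length_map]
    by_cases hneg : ad < 0
    · rw [rebuild_neg ad hneg, if_pos (Or.inl hneg)]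
      simp
    · push_neg at hneg
      rw [rebuild_eq text.toList ad hneg]
      by_cases hrange : ((digitIdxs text.toList 0).length : Int) ≤ ad
      · have hnone : (digitIdxs text.toList 0)[ad.toNat]? = none :=
          List.getElem?_eq_none (by omega)
        rw [hnone, if_pos (Or.inr hrange)]
        simp
      · push_neg at hrange
        have hlt : ad.toNat < (digitIdxs text.toList 0).length := by omega
        have hsome := List.getElem?_eq_getElem hlt
        rw [hsome, if_neg (by rw [not_or]; constructor <;> omega)]
        set t := (digitIdxs text.toList 0)[ad.toNat] with ht
        have hget : PySem.List.pyGet?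
            ((digitIdxs text.toList 0).map (fun (n : Nat) => (n : Int))) ad = some ((t : Int)) := by
          have h1 : ad = ((ad.toNat : Nat) : Int) := by omega
          rw [h1, PySem.List.pyGet?_natCast, List.getElem?_map]
          rw [hsome]; rfl
        rw [hget, Option.getD_some, PySem.List.slice_to_natCast]
        have h3 : ((t : Int) + 1) = (((t + 1 : Nat) : Int)) := by push_cast; ring
        rw [h3, PySem.List.slice_from_natCast]
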